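-- pv_equiv track=rewrite | github.com/GiulioCMSanto/HDSIdent | HDSIdent/initial_intervals/non_parametric_pettitt.py | _update_segments
-- ===== SOURCE A (Python) =====
-- def _update_segments(sig_tau_arr, N):
--     """
--     This function updates the running segments. Given an array
--     of significant changing-points, this functions splits the
--     current segments into new segments according to each changing-point.
--
--     Arguments:
--         sig_tau_arr: an array of significant changing-poins
--         N: the length of the entire running signal
--     """
--     new_segments_arr = []
--     for idx in range(len(sig_tau_arr)):
--         if len(sig_tau_arr) == 1:
--             new_segments_arr.append(list(range(0, sig_tau_arr[idx])))
--             new_segments_arr.append(list(range(sig_tau_arr[idx], N + 1)))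
--         elif len(sig_tau_arr) == 2:
--             if idx == 0:
--                 new_segments_arr.append(list(range(0, sig_tau_arr[idx])))
--             else:
--                 new_segments_arr.append(
--                     list(range(sig_tau_arr[idx - 1], sig_tau_arr[idx]))
--                 )
--                 new_segments_arr.append(list(range(sig_tau_arr[idx], N + 1)))
--         else:
--             if idx == 0:
--                 new_segments_arr.append(list(range(0, sig_tau_arr[idx])))
--             elif idx == len(sig_tau_arr) - 1:
--                 new_segments_arr.append(
--                     list(range(sig_tau_arr[idx - 1], sig_tau_arr[idx]))
--                 )
--                 new_segments_arr.append(list(range(sig_tau_arr[idx], N + 1)))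
--             else:
--                 new_segments_arr.append(
--                     list(range(sig_tau_arr[idx - 1], sig_tau_arr[idx]))
--                 )
--
--     return new_segments_arr
-- ===== SOURCE B (Python) =====
-- def _update_segments(sig_tau_arr, N):
--     if len(sig_tau_arr) == 0:
--         return []
--     bounds = [0] + list(sig_tau_arr) + [N + 1]
--     return [list(range(bounds[i], bounds[i + 1])) for i in range(len(bounds) - 1)]
-- ===== Notes on version B (the rewrite author's own statement) =====
-- stated objective: simpler
-- what changed: Replaces the three length-based branch cases inside the index loop by one uniform pass over adjacent pairs of a precomputed boundary list [0]+taus+[N+1], with an explicit empty-input early return.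
import Mathlib
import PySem

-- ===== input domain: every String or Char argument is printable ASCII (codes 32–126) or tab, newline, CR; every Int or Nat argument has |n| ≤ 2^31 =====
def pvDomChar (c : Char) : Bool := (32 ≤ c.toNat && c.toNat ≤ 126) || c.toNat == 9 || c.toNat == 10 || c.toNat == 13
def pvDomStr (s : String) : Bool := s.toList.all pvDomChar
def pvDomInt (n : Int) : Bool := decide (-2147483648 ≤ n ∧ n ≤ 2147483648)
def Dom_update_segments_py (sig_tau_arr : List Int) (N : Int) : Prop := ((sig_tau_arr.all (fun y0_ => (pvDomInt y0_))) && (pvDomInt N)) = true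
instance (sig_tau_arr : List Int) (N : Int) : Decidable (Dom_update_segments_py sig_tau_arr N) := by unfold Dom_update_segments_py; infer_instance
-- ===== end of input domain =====

-- B replaces A's three length-based branch cases by one uniform pass over adjacent
-- pairs of a precomputed boundary list [0]+taus+[N+1] (objective: simpler).

-- ===== PORT A =====
def update_segments_py (sig_tau_arr : List Int) (N : Int) : List (List Int) :=
  (PySem.List.pyRange 0 (sig_tau_arr.length : Int) 1).foldl (fun acc idx =>
    if sig_tau_arr.length = 1 then
      acc ++ [PySem.List.pyRange 0 (PySem.List.pyGetD sig_tau_arr idx 0) 1]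
          ++ [PySem.List.pyRange (PySem.List.pyGetD sig_tau_arr idx 0) (N + 1) 1]
    else if sig_tau_arr.length = 2 then
      if idx = 0 then
        acc ++ [PySem.List.pyRange 0 (PySem.List.pyGetD sig_tau_arr idx 0) 1]
      else
        acc ++ [PySem.List.pyRange (PySem.List.pyGetD sig_tau_arr (idx - 1) 0)
                  (PySem.List.pyGetD sig_tau_arr idx 0) 1]
            ++ [PySem.List.pyRange (PySem.List.pyGetD sig_tau_arr idx 0) (N + 1) 1]
    else
      if idx = 0 then
        acc ++ [PySem.List.pyRange 0 (PySem.List.pyGetD sig_tau_arr idx 0) 1]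
      else if idx = (sig_tau_arr.length : Int) - 1 then
        acc ++ [PySem.List.pyRange (PySem.List.pyGetD sig_tau_arr (idx - 1) 0)
                  (PySem.List.pyGetD sig_tau_arr idx 0) 1]
            ++ [PySem.List.pyRange (PySem.List.pyGetD sig_tau_arr idx 0) (N + 1) 1]
      else
        acc ++ [PySem.List.pyRange (PySem.List.pyGetD sig_tau_arr (idx - 1) 0)
                  (PySem.List.pyGetD sig_tau_arr idx 0) 1]) []

-- ===== PORT B =====
def update_segments_py_alt (sig_tau_arr : List Int) (N : Int) : List (List Int) :=
  if sig_tau_arr = [] then []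
  else
    let bounds : List Int := 0 :: (sig_tau_arr ++ [N + 1])
    (PySem.List.pyRange 0 ((bounds.length : Int) - 1) 1).map (fun i =>
      PySem.List.pyRange (PySem.List.pyGetD bounds i 0)
        (PySem.List.pyGetD bounds (i + 1) 0) 1)

-- ===== PRECONDITION & SPEC =====
def Spec_update_segments_py (sig_tau_arr : List Int) (N : Int) (out : List (List Int)) : Prop := out = update_segments_py_alt sig_tau_arr N
instance (sig_tau_arr : List Int) (N : Int) (out : List (List Int)) : Decidable (Spec_update_segments_py sig_tau_arr N out) := by unfold Spec_update_segments_py; infer_instance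

-- ===== CLAIM (what is proved, stated in full; the proofs are below) =====
def Claim_equal_update_segments_py : Prop := ∀ (sig_tau_arr : List Int) (N : Int), Dom_update_segments_py sig_tau_arr N → Spec_update_segments_py sig_tau_arr N (update_segments_py sig_tau_arr N)

-- ===== LEMMAS AND PROOFS =====

/-- Segments between adjacent boundaries, starting at `a`. -/
def pairsSeg (a : Int) : List Int → List (List Int)
  | [] => []
  | b :: bs => PySem.List.pyRange a b 1 :: pairsSeg b bs

theorem pyGetD_cons_shift (x : Int) (l : List Int) (i : Int) (h0 : 0 ≤ i)
    (h : i < (l.length : Int)) :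
    PySem.List.pyGetD (x :: l) (i + 1) 0 = PySem.List.pyGetD l i 0 := by
  rw [PySem.List.pyGetD_eq_getElem (x :: l) 0 (by omega) (by simp; omega),
      PySem.List.pyGetD_eq_getElem l 0 h0 (by simpa using h)]
  have : (i + 1).toNat = i.toNat + 1 := by omega
  simp [this]

theorem pyRange_shift (m : Nat) :
    PySem.List.pyRange 1 ((m : Int) + 1) 1 =
      (PySem.List.pyRange 0 (m : Int) 1).map (· + 1) := by
  rw [PySem.List.pyRange_one, PySem.List.pyRange_one]
  simp only [List.map_map]
  have h1 : ((m : Int) + 1 - 1).toNat = m := by omega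
  have h2 : ((m : Int) - 0).toNat = m := by omega
  rw [h1, h2]
  apply List.map_congr_left
  intro k _
  simp; ring

theorem mapPairs (l : List Int) : ∀ (a : Int),
    (PySem.List.pyRange 0 (l.length : Int) 1).map (fun i =>
      PySem.List.pyRange (PySem.List.pyGetD (a :: l) i 0)
        (PySem.List.pyGetD (a :: l) (i + 1) 0) 1) = pairsSeg a l := by
  induction l with
  | nil => intro a; simp [PySem.List.pyRange_one_eq_nil, pairsSeg]
  | cons b bs ih =>
    intro a
    have hlen : ((b :: bs).length : Int) = (bs.length : Int) + 1 := by simp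
    rw [hlen, PySem.List.pyRange_one_cons (by omega)]
    rw [show (0 : Int) + 1 = 1 by ring, pyRange_shift, List.map_cons, List.map_map]
    simp only [pairsSeg]
    congr 1
    · rw [PySem.List.pyGetD_zero_cons, show (0 : Int) + 1 = 1 by ring]
      rw [PySem.List.pyGetD_eq_getElem (a :: b :: bs) 0 (by omega) (by simp)]
      simp
    · rw [← ih b]
      apply List.map_congr_left
      intro i hi
      have hmem := (PySem.List.mem_pyRange_one).1 hi
      simp only [Function.comp]
      rw [pyGetD_cons_shift a (b :: bs) i hmem.1 (by simp; omega),
          show i + 1 + 1 = (i + 1) + 1 by ring,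
          pyGetD_cons_shift a (b :: bs) (i + 1) (by omega) (by simp; omega)]

theorem alt_eq_pairsSeg (taus : List Int) (N : Int) (h : taus ≠ []) :
    update_segments_py_alt taus N = pairsSeg 0 (taus ++ [N + 1]) := by
  unfold update_segments_py_alt
  rw [if_neg h]
  show (PySem.List.pyRange 0 (((0 :: (taus ++ [N + 1])).length : Int) - 1) 1).map (fun i =>
      PySem.List.pyRange (PySem.List.pyGetD (0 :: (taus ++ [N + 1])) i 0)
        (PySem.List.pyGetD (0 :: (taus ++ [N + 1])) (i + 1) 0) 1) = pairsSeg 0 (taus ++ [N + 1])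
  have hlen : (((0 :: (taus ++ [N + 1])).length : Int)) - 1 = ((taus ++ [N + 1]).length : Int) := by
    simp
  rw [hlen, mapPairs]

-- The loop body of A, named for the lemmas below.
def bodyA (taus : List Int) (N : Int) (acc : List (List Int)) (idx : Int) : List (List Int) :=
  if taus.length = 1 then
    acc ++ [PySem.List.pyRange 0 (PySem.List.pyGetD taus idx 0) 1]
        ++ [PySem.List.pyRange (PySem.List.pyGetD taus idx 0) (N + 1) 1]
  else if taus.length = 2 then
    if idx = 0 then
      acc ++ [PySem.List.pyRange 0 (PySem.List.pyGetD taus idx 0) 1]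
    else
      acc ++ [PySem.List.pyRange (PySem.List.pyGetD taus (idx - 1) 0)
                (PySem.List.pyGetD taus idx 0) 1]
          ++ [PySem.List.pyRange (PySem.List.pyGetD taus idx 0) (N + 1) 1]
  else
    if idx = 0 then
      acc ++ [PySem.List.pyRange 0 (PySem.List.pyGetD taus idx 0) 1]
    else if idx = (taus.length : Int) - 1 then
      acc ++ [PySem.List.pyRange (PySem.List.pyGetD taus (idx - 1) 0)
                (PySem.List.pyGetD taus idx 0) 1]
          ++ [PySem.List.pyRange (PySem.List.pyGetD taus idx 0) (N + 1) 1]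
    else
      acc ++ [PySem.List.pyRange (PySem.List.pyGetD taus (idx - 1) 0)
                (PySem.List.pyGetD taus idx 0) 1]

theorem update_segments_py_eq_foldl_bodyA (taus : List Int) (N : Int) :
    update_segments_py taus N =
      (PySem.List.pyRange 0 (taus.length : Int) 1).foldl (bodyA taus N) [] := rfl

theorem loopA (taus : List Int) (N : Int) (h3 : 3 ≤ taus.length) :
    ∀ (k s : Nat), s + k = taus.length - 1 → 1 ≤ s → ∀ (acc : List (List Int)),
    (PySem.List.pyRange (s : Int) (taus.length : Int) 1).foldl (bodyA taus N) acc
      = acc ++ pairsSeg (taus.getD (s - 1) 0) (taus.drop s ++ [N + 1]) := by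
  intro k
  induction k with
  | zero =>
    intro s hs h1 acc
    have hsn : s = taus.length - 1 := by omega
    have hlt : (s : Int) < (taus.length : Int) := by omega
    rw [PySem.List.pyRange_one_cons hlt]
    have hnil : PySem.List.pyRange ((s : Int) + 1) (taus.length : Int) 1 = [] :=
      PySem.List.pyRange_one_eq_nil (by omega)
    rw [hnil]
    simp only [List.foldl_cons, List.foldl_nil, bodyA]
    rw [if_neg (by omega), if_neg (by omega), if_neg (by omega), if_pos (by omega)]
    have hgs : PySem.List.pyGetD taus (s : Int) 0 = taus.getD s 0 := by
      simp [PySem.List.pyGetD_natCast]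
    have hgs1 : PySem.List.pyGetD taus ((s : Int) - 1) 0 = taus.getD (s - 1) 0 := by
      rw [show ((s : Int) - 1) = ((s - 1 : Nat) : Int) by omega]
      simp [PySem.List.pyGetD_natCast]
    have hdrop : taus.drop s = [taus.getD s 0] := by
      have hlast : taus.drop s = taus[s] :: taus.drop (s + 1) :=
        List.drop_eq_getElem_cons (by omega)
      rw [hlast, List.drop_of_length_le (by omega), List.getD_eq_getElem _ _ (by omega)]
    rw [hgs, hgs1, hdrop]
    simp [pairsSeg]
  | succ k ih =>
    intro s hs h1 acc
    have hlt : (s : Int) < (taus.length : Int) := by omega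
    rw [PySem.List.pyRange_one_cons hlt]
    simp only [List.foldl_cons]
    have hbody : bodyA taus N acc (s : Int) =
        acc ++ [PySem.List.pyRange (taus.getD (s - 1) 0) (taus.getD s 0) 1] := by
      unfold bodyA
      rw [if_neg (by omega), if_neg (by omega), if_neg (by omega), if_neg (by omega)]
      rw [show ((s : Int) - 1) = ((s - 1 : Nat) : Int) by omega]
      simp [PySem.List.pyGetD_natCast]
    rw [hbody, show ((s : Int) + 1) = ((s + 1 : Nat) : Int) by omega,
        ih (s + 1) (by omega) (by omega)]
    have hdrop : taus.drop s = taus.getD s 0 :: taus.drop (s + 1) := by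
      rw [List.drop_eq_getElem_cons (by omega), List.getD_eq_getElem _ _ (by omega)]
    rw [hdrop]
    simp only [List.cons_append, pairsSeg, Nat.add_sub_cancel]
    simp

-- ===== VERDICT (by name: the statement is the Claim_ definition above) =====
theorem update_segments_py_spec : Claim_equal_update_segments_py := by
  intro taus N _
  unfold Spec_update_segments_py
  match htaus : taus with
  | [] => rfl
  | [t] =>
    rw [alt_eq_pairsSeg _ _ (by simp)]
    rw [update_segments_py_eq_foldl_bodyA]
    have : PySem.List.pyRange 0 ((([t] : List Int).length : Int)) 1 = [0] := by
      simpa using PySem.List.pyRange_one_singleton (a := (0 : Int))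
    rw [this]
    simp [bodyA, pairsSeg, PySem.List.pyGetD_zero_cons]
  | [t, u] =>
    rw [alt_eq_pairsSeg _ _ (by simp)]
    rw [update_segments_py_eq_foldl_bodyA]
    have h2 : ((([t, u] : List Int).length : Int)) = 2 := by simp
    rw [h2, show PySem.List.pyRange (0 : Int) 2 1 = [0, 1] from by decide]
    simp only [List.foldl_cons, List.foldl_nil, bodyA]
    norm_num
    simp [pairsSeg, PySem.List.pyGetD_ofNat']
  | t :: u :: v :: rest =>
    rw [alt_eq_pairsSeg _ _ (by simp)]
    rw [update_segments_py_eq_foldl_bodyA]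
    set l : List Int := t :: u :: v :: rest with hl
    have h3 : 3 ≤ l.length := by simp [hl]
    have hpos : (0 : Int) < (l.length : Int) := by omega
    rw [PySem.List.pyRange_one_cons hpos]
    simp only [List.foldl_cons]
    have hbody0 : bodyA l N [] 0 = [PySem.List.pyRange 0 t 1] := by
      unfold bodyA
      rw [if_neg (by omega), if_neg (by omega), if_pos rfl]
      simp [hl, PySem.List.pyGetD_zero_cons]
    rw [hbody0, show (0 : Int) + 1 = ((1 : Nat) : Int) by norm_num,
        loopA l N h3 (l.length - 2) 1 (by omega) (by omega)]
    have : l.getD 0 0 = t := by simp [hl]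
    rw [this]
    have hdrop : l.drop 1 = u :: v :: rest := by simp [hl]
    rw [hdrop]
    simp [hl, pairsSeg]
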